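-- pv_equiv track=rewrite | github.com/PranavRao25/Tech-Meet-24 | WebAgent/utils.py | limit_word_count
-- ===== SOURCE A (Python) =====
-- def limit_word_count(input_string: str, max_word_count:int = 1000) -> str:
--     """
--     Limit the word count of an input string to a specified maximum, while preserving the integrity of complete lines.
--     Args:
--         input_string (str): The string to be truncated.
--         max_word_count (int): The maximum number of words allowed in the truncated string.
--
--     Returns:
--         str: The truncated string with word count limited to `max_word_count`, preserving complete lines.
--     """
--
--     word_count = 0
--     limited_string = ""
--
--     # Split the input string by lines
--     for word in input_string.split("\n"):
--         line_words = word.split()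
--         # Split each line into words and count them
--         for lw in line_words:
--             if word_count < max_word_count:
--                 limited_string += lw + " "
--                 word_count += 1
--             else:
--                 break
--         if word_count >= max_word_count:
--             break
--         limited_string = limited_string.strip() + "\n"
--
--     return limited_string.strip()
-- ===== SOURCE B (Python) =====
-- def limit_word_count(input_string: str, max_word_count: int = 1000) -> str:
--     out_lines = []
--     remaining = max_word_count
--     for line in input_string.split("\n"):
--         if remaining <= 0:
--             break
--         take = line.split()[:remaining]
--         remaining -= len(take)
--         if take:
--             out_lines.append(" ".join(take))
--     return "\n".join(out_lines)
-- ===== Notes on version B (the rewrite author's own statement) =====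
-- stated objective: idiomatic
-- what changed: Replaces the per-word counter with a running budget, word slicing per line, and builds a filtered list joined once at the end instead of repeated string concatenation followed by strip-renormalisation.
import Mathlib
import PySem

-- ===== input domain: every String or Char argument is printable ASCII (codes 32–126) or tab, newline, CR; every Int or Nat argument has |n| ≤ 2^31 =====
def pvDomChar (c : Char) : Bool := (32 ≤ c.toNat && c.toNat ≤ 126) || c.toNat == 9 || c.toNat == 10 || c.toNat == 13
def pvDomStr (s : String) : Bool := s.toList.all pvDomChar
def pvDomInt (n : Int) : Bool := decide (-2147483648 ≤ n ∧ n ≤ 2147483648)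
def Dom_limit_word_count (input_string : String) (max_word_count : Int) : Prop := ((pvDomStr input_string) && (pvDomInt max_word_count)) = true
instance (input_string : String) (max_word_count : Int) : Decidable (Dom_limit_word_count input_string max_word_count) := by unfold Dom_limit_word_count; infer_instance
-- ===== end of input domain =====

-- B replaces A's word counter and incremental strip-concatenation with a running budget,
-- per-line word slicing, and a filtered list joined once at the end (idiomatic; same result).

-- ===== PORT A =====
-- inner loop: 'for lw in line_words: if word_count < max_word_count: limited_string += lw + " "; word_count += 1 else: break'
def lwcInner (maxWc : Int) : List (List Char) → Int → List Char → Int × List Char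
  | [], wc, acc => (wc, acc)
  | lw :: rest, wc, acc =>
      if wc < maxWc then lwcInner maxWc rest (wc + 1) (acc ++ lw ++ [' '])
      else (wc, acc)

-- outer loop over input_string.split("\n"); returns limited_string at loop exit (the final .strip() is applied by the wrapper)
def lwcOuter (maxWc : Int) : List (List Char) → Int → List Char → List Char
  | [], _, acc => acc
  | line :: rest, wc, acc =>
      let p := lwcInner maxWc (PySem.Chars.split₀ line) wc acc
      if maxWc ≤ p.1 then p.2
      else lwcOuter maxWc rest p.1 (PySem.Chars.strip p.2 ++ ['\n'])

def limit_word_count (input_string : String) (max_word_count : Int) : String :=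
  String.ofList (PySem.Chars.strip
    (lwcOuter max_word_count (PySem.Chars.splitOn input_string.toList ['\n']) 0 []))

-- ===== PORT B =====
-- 'for line in lines: if remaining <= 0: break; take = line.split()[:remaining]; remaining -= len(take); if take: out_lines.append(" ".join(take))'
def lwcLines : List (List Char) → Int → List (List Char)
  | [], _ => []
  | line :: rest, remaining =>
      if remaining ≤ 0 then []
      else
        let take := PySem.List.slice (PySem.Chars.split₀ line) none (some remaining)
        let r := lwcLines rest (remaining - take.length)
        if take = [] then r else PySem.Chars.join [' '] take :: r

def limit_word_count_alt (input_string : String) (max_word_count : Int) : String :=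
  String.ofList (PySem.Chars.join ['\n']
    (lwcLines (PySem.Chars.splitOn input_string.toList ['\n']) max_word_count))

-- ===== PRECONDITION & SPEC =====
def Spec_limit_word_count (input_string : String) (max_word_count : Int) (out : String) : Prop := out = limit_word_count_alt input_string max_word_count
instance (input_string : String) (max_word_count : Int) (out : String) : Decidable (Spec_limit_word_count input_string max_word_count out) := by unfold Spec_limit_word_count; infer_instance

-- ===== CLAIM (what is proved, stated in full; the proofs are below) =====
def Claim_equal_limit_word_count : Prop := ∀ (input_string : String) (max_word_count : Int), Dom_limit_word_count input_string max_word_count → Spec_limit_word_count input_string max_word_count (limit_word_count input_string max_word_count)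

-- ===== LEMMAS AND PROOFS =====

-- a list with no leading and no trailing whitespace (what every emitted output line satisfies)
def lwcOk (e : List Char) : Prop :=
  e ≠ [] ∧ PySem.Chars.lstrip e = e ∧ PySem.Chars.rstrip e = e

lemma lwc_lstrip_append (s t : List Char) :
    PySem.Chars.lstrip (s ++ t) =
      if (PySem.Chars.lstrip s).isEmpty then PySem.Chars.lstrip t
      else PySem.Chars.lstrip s ++ t := by
  simp [PySem.Chars.lstrip, List.dropWhile_append]

lemma lwc_rstrip_append (s t : List Char) :
    PySem.Chars.rstrip (s ++ t) =
      if (PySem.Chars.rstrip t).isEmpty then PySem.Chars.rstrip s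
      else s ++ PySem.Chars.rstrip t := by
  simp [PySem.Chars.rstrip, List.dropWhile_append]
  split_ifs <;> simp_all

-- every word produced by split₀ (Python str.split()) is nonempty and whitespace-free
lemma lwc_go_good : ∀ (s cur : List Char) (acc : List (List Char)),
    (∀ c ∈ cur, PySem.Chars.isspace c = false) →
    (∀ w ∈ acc, w ≠ [] ∧ ∀ c ∈ w, PySem.Chars.isspace c = false) →
    ∀ w ∈ PySem.Chars.split₀.go s cur acc, w ≠ [] ∧ ∀ c ∈ w, PySem.Chars.isspace c = false := by
  intro s
  induction s with
  | nil =>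
      intro cur acc hcur hacc w hw
      unfold PySem.Chars.split₀.go at hw
      by_cases h : cur = [] <;> simp [h] at hw
      · exact hacc w hw
      · rcases hw with hw | hw
        · exact hacc w hw
        · subst hw
          exact ⟨by simpa using h, fun c hc => hcur c (by simpa using hc)⟩
  | cons c rest ih =>
      intro cur acc hcur hacc w hw
      unfold PySem.Chars.split₀.go at hw
      by_cases hs : PySem.Chars.isspace c <;> simp [hs] at hw
      · by_cases h : cur = [] <;> simp [h] at hw
        · exact ih [] acc (by simp) hacc w hw
        · refine ih [] (cur.reverse :: acc) (by simp) ?_ w hw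
          intro u hu
          rcases List.mem_cons.mp hu with hu | hu
          · subst hu
            exact ⟨by simpa using h, fun d hd => hcur d (by simpa using hd)⟩
          · exact hacc u hu
      · refine ih (c :: cur) acc ?_ hacc w hw
        intro d hd
        rcases List.mem_cons.mp hd with hd | hd
        · subst hd; simpa using hs
        · exact hcur d hd

lemma lwc_split₀_good (s : List Char) :
    ∀ w ∈ PySem.Chars.split₀ s, w ≠ [] ∧ ∀ c ∈ w, PySem.Chars.isspace c = false :=
  lwc_go_good s [] [] (by simp) (by simp)

lemma lwc_word_ok (w : List Char) (hne : w ≠ [])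
    (h : ∀ c ∈ w, PySem.Chars.isspace c = false) : lwcOk w := by
  have hd : ∀ (l : List Char), (∀ c ∈ l, PySem.Chars.isspace c = false) →
      List.dropWhile PySem.Chars.isspace l = l := by
    intro l hl
    induction l with
    | nil => rfl
    | cons a t ih => simp [List.dropWhile, hl a (by simp)]
  refine ⟨hne, ?_, ?_⟩
  · exact hd w h
  · simp [PySem.Chars.rstrip, hd w.reverse (by simpa using h)]

lemma lwc_join_ok (sep : Char) : ∀ (ts : List (List Char)), ts ≠ [] →
    (∀ w ∈ ts, lwcOk w) → lwcOk (PySem.Chars.join [sep] ts) := by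
  intro ts
  induction ts with
  | nil => intro h; exact absurd rfl h
  | cons a rest ih =>
      intro _ h
      have ha := h a (by simp)
      cases rest with
      | nil => simpa [PySem.Chars.join_singleton] using ha
      | cons b rest' =>
          have hrest := ih (by simp) (fun w hw => h w (by simp [hw]))
          rw [PySem.Chars.join_cons_cons]
          obtain ⟨hne, hl, hr⟩ := ha
          obtain ⟨hne', hl', hr'⟩ := hrest
          refine ⟨by simp [hne], ?_, ?_⟩
          · rw [List.append_assoc, lwc_lstrip_append, hl]
            simp [List.isEmpty_iff, hne]
          · rw [List.append_assoc, lwc_rstrip_append a, lwc_rstrip_append [sep], hr']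
            simp [List.isEmpty_iff, hne']

lemma lwc_join_append_singleton (sep : List Char) :
    ∀ (ts : List (List Char)) (x : List Char), ts ≠ [] →
    PySem.Chars.join sep (ts ++ [x]) = PySem.Chars.join sep ts ++ sep ++ x := by
  intro ts
  induction ts with
  | nil => intro x h; exact absurd rfl h
  | cons a rest ih =>
      intro x _
      cases rest with
      | nil => simp [PySem.Chars.join_cons_cons, PySem.Chars.join_singleton]
      | cons b rest' =>
          have h1 : a :: (b :: rest') ++ [x] = a :: b :: (rest' ++ [x]) := by simp
          rw [h1, PySem.Chars.join_cons_cons]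
          have h2 : b :: (rest' ++ [x]) = (b :: rest') ++ [x] := by simp
          rw [h2, ih x (by simp), PySem.Chars.join_cons_cons]
          simp

lemma lwc_flatMap_eq : ∀ (ts : List (List Char)), ts ≠ [] →
    ts.flatMap (fun w => w ++ [' ']) = PySem.Chars.join [' '] ts ++ [' '] := by
  intro ts
  induction ts with
  | nil => intro h; exact absurd rfl h
  | cons a rest ih =>
      intro _
      cases rest with
      | nil => simp [PySem.Chars.join_singleton]
      | cons b rest' =>
          rw [List.flatMap_cons, ih (by simp), PySem.Chars.join_cons_cons]
          simp

-- strip of a newline-terminated accumulator recovers the joined output lines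
lemma lwc_strip_inv (out : List (List Char)) (hout : ∀ e ∈ out, lwcOk e) :
    PySem.Chars.strip (PySem.Chars.join ['\n'] out ++ ['\n']) = PySem.Chars.join ['\n'] out := by
  cases out with
  | nil => decide
  | cons a rest =>
      obtain ⟨hne, hl, hr⟩ := lwc_join_ok '\n' (a :: rest) (by simp) hout
      unfold PySem.Chars.strip
      rw [lwc_lstrip_append, hl]
      simp only [List.isEmpty_iff, hne, if_false]
      rw [lwc_rstrip_append, hr]
      simp [List.isEmpty_iff]
      decide

-- A's inner loop takes the first (max_word_count - word_count) words and appends them space-terminated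
lemma lwcInner_spec (maxWc : Int) : ∀ (ws : List (List Char)) (wc : Int) (acc : List Char),
    lwcInner maxWc ws wc acc =
      (wc + ((min ws.length (maxWc - wc).toNat : Nat) : Int),
       acc ++ (ws.take (maxWc - wc).toNat).flatMap (fun w => w ++ [' '])) := by
  intro ws
  induction ws with
  | nil => intro wc acc; simp [lwcInner]
  | cons w rest ih =>
      intro wc acc
      by_cases h : wc < maxWc
      · have hn : (maxWc - wc).toNat = (maxWc - (wc + 1)).toNat + 1 := by omega
        rw [lwcInner, if_pos h, ih, hn]
        simp only [Prod.mk.injEq, List.take_succ_cons, List.flatMap_cons, List.length_cons]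
        exact ⟨by push_cast; omega, by simp⟩
      · have hn : (maxWc - wc).toNat = 0 := by omega
        rw [lwcInner, if_neg h, hn]
        simp

lemma lwcLines_nonpos (lines : List (List Char)) (r : Int) (h : r ≤ 0) :
    lwcLines lines r = [] := by
  cases lines with
  | nil => rfl
  | cons a t => rw [lwcLines, if_pos h]

-- strip of the accumulator after appending the taken words of a line
lemma lwc_strip_core (out take : List (List Char)) (acc : List Char)
    (hout : ∀ e ∈ out, lwcOk e)
    (htake : ∀ w ∈ take, w ≠ [] ∧ ∀ c ∈ w, PySem.Chars.isspace c = false)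
    (ht : take ≠ [])
    (hacc : (acc = [] ∧ out = []) ∨ acc = PySem.Chars.join ['\n'] out ++ ['\n']) :
    PySem.Chars.strip (acc ++ take.flatMap (fun w => w ++ [' ']))
      = PySem.Chars.join ['\n'] (out ++ [PySem.Chars.join [' '] take]) := by
  obtain ⟨hJne, hJl, hJr⟩ :=
    lwc_join_ok ' ' take ht (fun w hw => lwc_word_ok w (htake w hw).1 (htake w hw).2)
  have hflat := lwc_flatMap_eq take ht
  have hrflat : PySem.Chars.rstrip (take.flatMap (fun w => w ++ [' ']))
      = PySem.Chars.join [' '] take := by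
    rw [hflat, lwc_rstrip_append, hJr]
    simp [List.isEmpty_iff]
    decide
  have hlflat : PySem.Chars.lstrip (take.flatMap (fun w => w ++ [' ']))
      = PySem.Chars.join [' '] take ++ [' '] := by
    rw [hflat, lwc_lstrip_append, hJl]
    simp [List.isEmpty_iff, hJne]
  rcases hacc with ⟨h1, h2⟩ | h1
  · subst h1; subst h2
    unfold PySem.Chars.strip
    rw [List.nil_append, hlflat, lwc_rstrip_append, hJr]
    simp [List.isEmpty_iff, PySem.Chars.join_singleton]
    decide
  · subst h1
    cases out with
    | nil =>
        unfold PySem.Chars.strip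
        rw [PySem.Chars.join_nil, List.nil_append, List.cons_append, List.nil_append,
          show ('\n' :: take.flatMap (fun w => w ++ [' '])) = ['\n'] ++ take.flatMap (fun w => w ++ [' ']) from rfl,
          lwc_lstrip_append]
        simp only [show PySem.Chars.lstrip ['\n'] = [] from by decide, List.isEmpty_nil, if_true]
        rw [hlflat, lwc_rstrip_append, hJr]
        simp [List.isEmpty_iff, PySem.Chars.join_singleton]
        decide
    | cons a rest =>
        obtain ⟨hXne, hXl, hXr⟩ := lwc_join_ok '\n' (a :: rest) (by simp) hout
        unfold PySem.Chars.strip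
        rw [List.append_assoc, lwc_lstrip_append, hXl]
        simp only [List.isEmpty_iff, hXne, if_false]
        rw [lwc_rstrip_append,
          show (['\n'] ++ take.flatMap (fun w => w ++ [' '])) = ['\n'] ++ take.flatMap (fun w => w ++ [' ']) from rfl,
          lwc_rstrip_append, hrflat]
        simp only [List.isEmpty_iff, hJne, if_false]
        rw [lwc_join_append_singleton ['\n'] (a :: rest) _ (by simp)]
        simp

-- loop invariant: A's stripped accumulator tracks B's output-line list
lemma lwc_main (maxWc : Int) : ∀ (lines : List (List Char)) (wc : Int) (acc : List Char)
    (out : List (List Char)),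
    wc < maxWc →
    (∀ e ∈ out, lwcOk e) →
    ((acc = [] ∧ out = []) ∨ acc = PySem.Chars.join ['\n'] out ++ ['\n']) →
    PySem.Chars.strip (lwcOuter maxWc lines wc acc)
      = PySem.Chars.join ['\n'] (out ++ lwcLines lines (maxWc - wc)) := by
  intro lines
  induction lines with
  | nil =>
      intro wc acc out hwc hout hacc
      rw [lwcOuter, lwcLines, List.append_nil]
      rcases hacc with ⟨h1, h2⟩ | h1
      · subst h1; subst h2; decide
      · subst h1; exact lwc_strip_inv out hout
  | cons line rest ih =>
      intro wc acc out hwc hout hacc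
      have hr : (0:Int) < maxWc - wc := by omega
      simp only [lwcOuter, lwcLines, lwcInner_spec]
      rw [if_neg (show ¬ maxWc - wc ≤ 0 by omega), PySem.List.slice_to _ (le_of_lt hr)]
      have hgood := lwc_split₀_good line
      generalize hws : PySem.Chars.split₀ line = ws at hgood ⊢
      have hrt : ((maxWc - wc).toNat : Int) = maxWc - wc := by omega
      have htlen : (ws.take (maxWc - wc).toNat).length = min (maxWc - wc).toNat ws.length :=
        List.length_take
      have htake : ∀ w ∈ ws.take (maxWc - wc).toNat,
          w ≠ [] ∧ ∀ c ∈ w, PySem.Chars.isspace c = false :=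
        fun w hw => hgood w (List.mem_of_mem_take hw)
      by_cases hbreak : maxWc ≤ wc + ((min ws.length (maxWc - wc).toNat : Nat) : Int)
      · -- break: the cap is reached inside this line
        have htne : ws.take (maxWc - wc).toNat ≠ [] := by
          intro h
          rw [h] at htlen
          simp at htlen
          omega
        rw [if_pos hbreak, if_neg htne]
        have h0 : maxWc - wc - (((ws.take (maxWc - wc).toNat).length : Nat) : Int) ≤ 0 := by
          rw [htlen]; push_cast; omega
        rw [lwcLines_nonpos rest _ h0]
        exact lwc_strip_core out _ acc hout htake htne hacc
      · -- no break: the whole line is consumed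
        have hmin : min ws.length (maxWc - wc).toNat = ws.length := by omega
        have htall : ws.take (maxWc - wc).toNat = ws := List.take_of_length_le (by omega)
        rw [if_neg hbreak]
        by_cases hwe : ws = []
        · -- empty line: acc is re-normalised, out unchanged
          rw [if_pos (by rw [htall]; exact hwe)]
          have hstrip : PySem.Chars.strip acc = PySem.Chars.join ['\n'] out := by
            rcases hacc with ⟨h1, h2⟩ | h1
            · subst h1; subst h2; decide
            · subst h1; exact lwc_strip_inv out hout
          have := ih (wc + ((min ws.length (maxWc - wc).toNat : Nat) : Int))
            (PySem.Chars.strip (acc ++ List.flatMap (fun w => w ++ [' ']) (ws.take (maxWc - wc).toNat)) ++ ['\n'])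
            out (by omega) hout
            (Or.inr (by rw [htall, hwe]; simp [hstrip]))
          rw [this]
          congr 2
          rw [htall, hwe]
          simp
        · -- non-empty line: one more output line
          rw [if_neg (by rw [htall]; exact hwe)]
          have hJ := lwc_join_ok ' ' (ws.take (maxWc - wc).toNat) (by rw [htall]; exact hwe)
            (fun w hw => lwc_word_ok w (htake w hw).1 (htake w hw).2)
          have hcore := lwc_strip_core out (ws.take (maxWc - wc).toNat) acc hout htake
            (by rw [htall]; exact hwe) hacc
          have hout' : ∀ e ∈ out ++ [PySem.Chars.join [' '] (ws.take (maxWc - wc).toNat)], lwcOk e := by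
            intro e he
            rcases List.mem_append.mp he with he | he
            · exact hout e he
            · simp at he; subst he; exact hJ
          have := ih (wc + ((min ws.length (maxWc - wc).toNat : Nat) : Int))
            (PySem.Chars.strip (acc ++ List.flatMap (fun w => w ++ [' ']) (ws.take (maxWc - wc).toNat)) ++ ['\n'])
            (out ++ [PySem.Chars.join [' '] (ws.take (maxWc - wc).toNat)]) (by omega) hout'
            (Or.inr (by rw [hcore]))
          rw [this, List.append_assoc, htall, hmin,
            show maxWc - (wc + (ws.length:Int)) = maxWc - wc - (ws.length:Int) by ring]
          simp

-- ===== VERDICT (by name: the statement is the Claim_ definition above) =====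
theorem limit_word_count_spec : Claim_equal_limit_word_count := by
  intro input_string max_word_count _
  unfold Spec_limit_word_count limit_word_count limit_word_count_alt
  by_cases h : 0 < max_word_count
  · have := lwc_main max_word_count (PySem.Chars.splitOn input_string.toList ['\n']) 0 [] []
      h (by simp) (Or.inl ⟨rfl, rfl⟩)
    rw [this]
    simp
  · -- max_word_count ≤ 0: both sides are empty
    rw [lwcLines_nonpos _ _ (by omega)]
    cases hl : PySem.Chars.splitOn input_string.toList ['\n'] with
    | nil => rfl
    | cons a t =>
        rw [lwcOuter]
        simp only [lwcInner_spec]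
        have h0 : (max_word_count - 0).toNat = 0 := by omega
        rw [h0]
        simp only [min_zero, Nat.cast_zero, add_zero, List.take_zero,
          List.flatMap_nil, List.append_nil, if_pos (le_of_not_gt h)]
        rfl
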